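-- pv_equiv track=rewrite | github.com/ak2k2/Connect-Four-Alpha-Beta-AI | connect_four.py | in_a_row_met
-- ===== SOURCE A (Python) =====
-- IN_A_ROW = 4  # Number of pieces in a row needed to win
--
-- def in_a_row_met(arr: list, in_a_row=IN_A_ROW):
--     """
--     if in_a_row=IN_A_ROW streaks mark game over conditions.
--     if in_a_row < IN_A_ROW then steraks can be used to count sequences for evaluation.
--     """
--     streakR = 0
--     streakY = 0
--     for p in arr:
--         if p == -1:
--             streakY = 0
--             streakR += 1
--             if streakR == in_a_row:
--                 return -1  # Red wins
--         elif p == 1: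
--             streakR = 0
--             streakY += 1
--             if streakY == in_a_row:
--                 return 1  # Yellow wins
--         else:
--             streakR, streakY = 0, 0
--     return 0  # No one wins
-- ===== SOURCE B (Python) =====
-- def in_a_row_met(arr: list, in_a_row=4):
--     """Run-based rewrite: split arr into maximal runs of equal values and
--     return the first run's colour whose length reaches the threshold."""
--     if in_a_row < 1:
--         return 0
--     i, n = 0, len(arr)
--     while i < n:
--         v = arr[i]
--         j = i
--         while j < n and arr[j] == v:
--             j += 1
--         if v in (-1, 1) and j - i >= in_a_row:
--             return v
--         i = j
--     return 0
-- ===== Notes on version B (the rewrite author's own statement) =====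
-- stated objective: alternative
-- what changed: B replaces A's two reset-counters with a run decomposition: it splits the list into maximal runs of equal values and returns the first run of colour -1/1 whose length reaches the (positive) threshold, 0 otherwise.
import Mathlib
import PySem

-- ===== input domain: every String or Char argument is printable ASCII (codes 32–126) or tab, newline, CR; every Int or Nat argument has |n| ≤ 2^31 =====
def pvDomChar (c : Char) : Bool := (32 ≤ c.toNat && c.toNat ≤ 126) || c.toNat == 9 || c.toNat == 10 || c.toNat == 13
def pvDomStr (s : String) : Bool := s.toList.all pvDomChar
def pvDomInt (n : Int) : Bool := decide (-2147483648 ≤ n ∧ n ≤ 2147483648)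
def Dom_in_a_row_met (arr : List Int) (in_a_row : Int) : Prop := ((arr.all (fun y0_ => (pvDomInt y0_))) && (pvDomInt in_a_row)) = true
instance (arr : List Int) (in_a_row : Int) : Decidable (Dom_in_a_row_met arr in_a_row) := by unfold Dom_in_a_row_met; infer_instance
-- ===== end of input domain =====

-- B keeps maximal runs of equal values instead of A's two reset-counters; objective: alternative (same cost).

-- ===== PORT A =====
-- the for-loop with early return, carrying (streakR, streakY)
def pvAGo (arr : List Int) (sR sY : Int) (k : Int) : Int :=
  match arr with
  | [] => 0
  | p :: rest =>
    if p = -1 then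
      let sR' := sR + 1
      if sR' = k then -1 else pvAGo rest sR' 0 k
    else if p = 1 then
      let sY' := sY + 1
      if sY' = k then 1 else pvAGo rest 0 sY' k
    else pvAGo rest 0 0 k

def in_a_row_met (arr : List Int) (in_a_row : Int) : Int :=
  pvAGo arr 0 0 in_a_row

-- ===== PORT B =====
-- consume one maximal run of the head value per step
def pvBGo (arr : List Int) (k : Int) : Int :=
  match arr with
  | [] => 0
  | v :: rest =>
    let run := rest.takeWhile (· == v)
    let len : Int := 1 + run.length
    if (v = -1 ∨ v = 1) ∧ k ≤ len then v
    else pvBGo (rest.dropWhile (· == v)) k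
termination_by arr.length
decreasing_by
  exact Nat.lt_succ_of_le (List.length_dropWhile_le _ _)

def in_a_row_met_alt (arr : List Int) (in_a_row : Int) : Int :=
  if in_a_row < 1 then 0 else pvBGo arr in_a_row

-- ===== PRECONDITION & SPEC =====
def Spec_in_a_row_met (arr : List Int) (in_a_row : Int) (out : Int) : Prop := out = in_a_row_met_alt arr in_a_row
instance (arr : List Int) (in_a_row : Int) (out : Int) : Decidable (Spec_in_a_row_met arr in_a_row out) := by unfold Spec_in_a_row_met; infer_instance

-- ===== CLAIM (what is proved, stated in full; the proofs are below) =====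
def Claim_equal_in_a_row_met : Prop := ∀ (arr : List Int) (in_a_row : Int), Dom_in_a_row_met arr in_a_row → Spec_in_a_row_met arr in_a_row (in_a_row_met arr in_a_row)

-- ===== LEMMAS AND PROOFS =====

-- threshold ≤ 0: A's counters start at 0 and only grow, so no hit
theorem pvAGo_nonpos : ∀ (arr : List Int) (sR sY k : Int), k ≤ 0 → 0 ≤ sR → 0 ≤ sY →
    pvAGo arr sR sY k = 0 := by
  intro arr
  induction arr with
  | nil => intro _ _ _ _ _ _; rfl
  | cons p rest ih =>
    intro sR sY k hk hR hY
    simp only [pvAGo]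
    split_ifs with h1 h2 h3 <;> first
      | omega
      | exact ih _ _ _ hk (by omega) (by omega)

-- after a run ends, the next element is not -1, so streakR is reset before it is read
theorem pvAGo_resetR : ∀ (arr : List Int) (sR k : Int),
    (∀ x ∈ arr.head?, x ≠ -1) → pvAGo arr sR 0 k = pvAGo arr 0 0 k := by
  intro arr sR k h
  cases arr with
  | nil => rfl
  | cons p rest =>
    have hp : p ≠ -1 := h p rfl
    simp only [pvAGo, if_neg hp]

theorem pvAGo_resetY : ∀ (arr : List Int) (sY k : Int),
    (∀ x ∈ arr.head?, x ≠ 1) → pvAGo arr 0 sY k = pvAGo arr 0 0 k := by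
  intro arr sY k h
  cases arr with
  | nil => rfl
  | cons p rest =>
    have hp : p ≠ 1 := h p rfl
    by_cases hn : p = -1 <;> simp [pvAGo, hp, hn]

-- A over a run of -1's: return -1 iff the threshold falls inside the streak window
theorem pvAGo_runNeg : ∀ (run rest : List Int) (sR k : Int), (∀ x ∈ run, x = -1) →
    pvAGo (run ++ rest) sR 0 k =
      if sR < k ∧ k ≤ sR + run.length then -1 else pvAGo rest (sR + run.length) 0 k := by
  intro run
  induction run with
  | nil => intro rest sR k _; simp
  | cons p tl ih =>
    intro rest sR k h
    have hp : p = -1 := h p (by simp)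
    subst hp
    have step : pvAGo ((-1 : Int) :: (tl ++ rest)) sR 0 k
        = if sR + 1 = k then -1 else pvAGo (tl ++ rest) (sR + 1) 0 k := by
      simp [pvAGo]
    rw [List.cons_append, step, ih rest (sR + 1) k (fun x hx => h x (by simp [hx]))]
    simp only [List.length_cons]
    by_cases he : sR + 1 = k
    · rw [if_pos he, if_pos (by push_cast; omega)]
    · rw [if_neg he]
      by_cases hc : sR + 1 < k ∧ k ≤ sR + 1 + (tl.length : Int)
      · rw [if_pos hc, if_pos (by push_cast; omega)]
      · rw [if_neg hc, if_neg (by push_cast; omega)]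
        congr 1
        push_cast
        omega

theorem pvAGo_runPos : ∀ (run rest : List Int) (sY k : Int), (∀ x ∈ run, x = 1) →
    pvAGo (run ++ rest) 0 sY k =
      if sY < k ∧ k ≤ sY + run.length then 1 else pvAGo rest 0 (sY + run.length) k := by
  intro run
  induction run with
  | nil => intro rest sY k _; simp
  | cons p tl ih =>
    intro rest sY k h
    have hp : p = 1 := h p (by simp)
    subst hp
    have step : pvAGo ((1 : Int) :: (tl ++ rest)) 0 sY k
        = if sY + 1 = k then 1 else pvAGo (tl ++ rest) 0 (sY + 1) k := by
      simp [pvAGo]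
    rw [List.cons_append, step, ih rest (sY + 1) k (fun x hx => h x (by simp [hx]))]
    simp only [List.length_cons]
    by_cases he : sY + 1 = k
    · rw [if_pos he, if_pos (by push_cast; omega)]
    · rw [if_neg he]
      by_cases hc : sY + 1 < k ∧ k ≤ sY + 1 + (tl.length : Int)
      · rw [if_pos hc, if_pos (by push_cast; omega)]
      · rw [if_neg hc, if_neg (by push_cast; omega)]
        congr 1
        push_cast
        omega

-- A skips a run of neutral values without changing state (0,0)
theorem pvAGo_runOther : ∀ (run rest : List Int) (k w : Int), w ≠ -1 → w ≠ 1 →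
    (∀ x ∈ run, x = w) → pvAGo (run ++ rest) 0 0 k = pvAGo rest 0 0 k := by
  intro run
  induction run with
  | nil => intro rest k w _ _ _; rfl
  | cons p tl ih =>
    intro rest k w hn h1 h
    have hp : p = w := h p (by simp)
    rw [List.cons_append, hp]
    simp only [pvAGo, if_neg hn, if_neg h1]
    exact ih rest k w hn h1 (fun x hx => h x (by simp [hx]))

theorem head_dropWhile_ne (v : Int) : ∀ (l : List Int),
    ∀ x ∈ (l.dropWhile (· == v)).head?, x ≠ v := by
  intro l
  induction l with
  | nil => intro x hx; simp at hx
  | cons a tl ih =>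
    intro x hx
    by_cases ha : a = v
    · rw [List.dropWhile_cons_of_pos (by simp [ha])] at hx
      exact ih x hx
    · rw [List.dropWhile_cons_of_neg (by simp [ha])] at hx
      simp at hx
      omega

theorem mem_takeWhile_eq (v : Int) (l : List Int) :
    ∀ x ∈ l.takeWhile (· == v), x = v := by
  intro x hx
  have := List.mem_takeWhile_imp hx
  simpa using this

-- the core correspondence, by strong induction on the list length
theorem pvGo_eq : ∀ (n : Nat) (arr : List Int) (k : Int), arr.length ≤ n → 1 ≤ k →
    pvAGo arr 0 0 k = pvBGo arr k := by
  intro n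
  induction n with
  | zero =>
    intro arr k hlen _
    have : arr = [] := List.length_eq_zero_iff.mp (Nat.le_zero.mp hlen)
    subst this
    simp [pvAGo, pvBGo]
  | succ m ih =>
    intro arr k hlen hk
    cases arr with
    | nil => simp [pvAGo, pvBGo]
    | cons v rest =>
      have hsplit : rest = rest.takeWhile (· == v) ++ rest.dropWhile (· == v) :=
        (List.takeWhile_append_dropWhile).symm
      have hdroplen : (rest.dropWhile (· == v)).length ≤ m := by
        have := List.length_dropWhile_le (· == v) rest
        simp at hlen
        omega
      have hihtail := ih (rest.dropWhile (· == v)) k hdroplen hk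
      rw [pvBGo]
      by_cases hneg : v = -1
      · subst hneg
        have harr : (-1 : Int) :: rest
            = ((-1 : Int) :: rest.takeWhile (· == (-1 : Int))) ++ rest.dropWhile (· == (-1 : Int)) := by
          rw [List.cons_append]
          exact congrArg _ hsplit
        rw [harr, pvAGo_runNeg _ _ 0 k (by
          intro x hx
          rcases List.mem_cons.mp hx with h | h
          · exact h
          · exact mem_takeWhile_eq _ _ x h)]
        simp only [List.length_cons]
        by_cases hc : k ≤ 1 + ((rest.takeWhile (· == (-1 : Int))).length : Int)
        · rw [if_pos (by push_cast; omega), if_pos ⟨by norm_num, hc⟩]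
        · rw [if_neg (by push_cast; omega), if_neg (fun hx => hc hx.2)]
          rw [pvAGo_resetR _ _ _ (fun x hx => head_dropWhile_ne (-1) rest x hx)]
          exact hihtail
      · by_cases hpos : v = 1
        · subst hpos
          have harr : (1 : Int) :: rest
              = ((1 : Int) :: rest.takeWhile (· == (1 : Int))) ++ rest.dropWhile (· == (1 : Int)) := by
            rw [List.cons_append]
            exact congrArg _ hsplit
          rw [harr, pvAGo_runPos _ _ 0 k (by
            intro x hx
            rcases List.mem_cons.mp hx with h | h
            · exact h
            · exact mem_takeWhile_eq _ _ x h)]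
          simp only [List.length_cons]
          by_cases hc : k ≤ 1 + ((rest.takeWhile (· == (1 : Int))).length : Int)
          · rw [if_pos (by push_cast; omega), if_pos ⟨by norm_num, hc⟩]
          · rw [if_neg (by push_cast; omega), if_neg (fun hx => hc hx.2)]
            rw [pvAGo_resetY _ _ _ (fun x hx => head_dropWhile_ne 1 rest x hx)]
            exact hihtail
        · have harr : v :: rest
              = (v :: rest.takeWhile (· == v)) ++ rest.dropWhile (· == v) := by
            rw [List.cons_append]
            exact congrArg _ hsplit
          rw [harr, pvAGo_runOther _ _ k v hneg hpos (by
            intro x hx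
            rcases List.mem_cons.mp hx with h | h
            · exact h
            · exact mem_takeWhile_eq _ _ x h)]
          rw [if_neg (by rintro ⟨h | h, _⟩ <;> [exact hneg h; exact hpos h])]
          exact hihtail

-- ===== VERDICT (by name: the statement is the Claim_ definition above) =====
theorem in_a_row_met_spec : Claim_equal_in_a_row_met := by
  intro arr k _
  unfold Spec_in_a_row_met in_a_row_met in_a_row_met_alt
  by_cases hk : k < 1
  · rw [if_pos hk]
    exact pvAGo_nonpos arr 0 0 k (by omega) le_rfl le_rfl
  · rw [if_neg hk]
    exact pvGo_eq arr.length arr k le_rfl (by omega)
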